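-- pv_equiv track=rewrite | github.com/lloydwyl97/mystic-codebase- | backend/services/trading_manager.py | validate_strategy_parameters
-- ===== SOURCE A (Python) =====
-- from typing import Any, Dict, Optional
--
-- def validate_strategy_parameters(
--     strategy_name: str, parameters: Dict[str, Any]
-- ) -> tuple[bool, str]:
--     """Validate strategy parameters."""
--     if not strategy_name:
--         return False, "Strategy name is required"
--
--     # Add specific validation for different strategies
--     if strategy_name == "momentum":
--         required_params = ["lookback_period", "threshold"]
--         for param in required_params:
--             if param not in parameters:
--                 return (
--                     False,
--                     f"Missing required parameter for momentum strategy: {param}",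
--                 )
--
--     elif strategy_name == "mean_reversion":
--         required_params = ["window_size", "std_dev"]
--         for param in required_params:
--             if param not in parameters:
--                 return (
--                     False,
--                     f"Missing required parameter for mean reversion strategy: {param}",
--                 )
--
--     return True, "Strategy parameters are valid"
-- ===== SOURCE B (Python) =====
-- REQUIREMENTS = [
--     ("momentum", "lookback_period", "momentum strategy"),
--     ("momentum", "threshold", "momentum strategy"),
--     ("mean_reversion", "window_size", "mean reversion strategy"),
--     ("mean_reversion", "std_dev", "mean reversion strategy"),
-- ]
--
--
-- def validate_strategy_parameters(strategy_name, parameters):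
--     if not strategy_name:
--         return False, "Strategy name is required"
--     missing = [(label, param) for (name, param, label) in REQUIREMENTS
--                if name == strategy_name and param not in parameters]
--     if missing:
--         label, param = missing[0]
--         return False, f"Missing required parameter for {label}: {param}"
--     return True, "Strategy parameters are valid"
-- ===== Notes on version B (the rewrite author's own statement) =====
-- stated objective: alternative
-- what changed: Replaced the per-strategy if/elif branches each running its own early-return loop by one flat (strategy, param, label) requirements table filtered in a single comprehension for missing entries, reporting the head of that list.
import Mathlib
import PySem

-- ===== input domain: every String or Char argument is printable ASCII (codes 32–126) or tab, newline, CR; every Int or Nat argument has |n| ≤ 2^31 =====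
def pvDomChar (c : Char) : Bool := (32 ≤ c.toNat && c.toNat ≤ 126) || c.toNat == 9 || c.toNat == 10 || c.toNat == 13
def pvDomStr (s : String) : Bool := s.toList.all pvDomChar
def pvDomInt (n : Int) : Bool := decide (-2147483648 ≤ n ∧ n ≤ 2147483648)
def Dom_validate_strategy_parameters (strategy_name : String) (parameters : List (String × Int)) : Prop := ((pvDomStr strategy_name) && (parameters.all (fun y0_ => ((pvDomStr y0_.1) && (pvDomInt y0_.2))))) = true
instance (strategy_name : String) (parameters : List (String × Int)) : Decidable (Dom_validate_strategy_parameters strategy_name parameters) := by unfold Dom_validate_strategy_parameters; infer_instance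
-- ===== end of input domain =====

-- B replaces A's per-strategy if/elif branches, each with its own early-return loop, by one flat requirements table filtered in a single pass whose head (if any) is reported (objective: alternative).


-- ===== PORT A =====
-- loop "for param in required_params: if param not in parameters: return (False, msgPrefix+param)"
def pvCheckA (msgPrefix : String) (parameters : List (String × Int)) : List String → Option (Bool × String)
  | [] => none
  | param :: rest =>
    if (parameters.map Prod.fst).contains param then pvCheckA msgPrefix parameters rest
    else some (false, msgPrefix ++ param)

def validate_strategy_parameters (strategy_name : String) (parameters : List (String × Int)) : Bool × String :=
  if strategy_name = "" then (false, "Strategy name is required")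
  else
    let early :=
      if strategy_name = "momentum" then
        pvCheckA "Missing required parameter for momentum strategy: " parameters ["lookback_period", "threshold"]
      else if strategy_name = "mean_reversion" then
        pvCheckA "Missing required parameter for mean reversion strategy: " parameters ["window_size", "std_dev"]
      else none
    match early with
    | some r => r
    | none => (true, "Strategy parameters are valid")

-- ===== PORT B =====
-- flat requirements table: (strategy name, required param, message label)
def pvRequirements : List (String × String × String) :=
  [("momentum", "lookback_period", "momentum strategy"),
   ("momentum", "threshold", "momentum strategy"),
   ("mean_reversion", "window_size", "mean reversion strategy"),
   ("mean_reversion", "std_dev", "mean reversion strategy")]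

def validate_strategy_parameters_alt (strategy_name : String) (parameters : List (String × Int)) : Bool × String :=
  if strategy_name = "" then (false, "Strategy name is required")
  else
    -- comprehension: [(label, param) for (name, param, label) in REQUIREMENTS if name == strategy_name and param not in parameters]
    let missing := (pvRequirements.filter
      (fun r => r.1 == strategy_name && !((parameters.map Prod.fst).contains r.2.1))).map
      (fun r => (r.2.2, r.2.1))
    match missing with
    | (label, param) :: _ => (false, "Missing required parameter for " ++ label ++ ": " ++ param)
    | [] => (true, "Strategy parameters are valid")

-- ===== PRECONDITION & SPEC =====
def Spec_validate_strategy_parameters (strategy_name : String) (parameters : List (String × Int)) (out : Bool × String) : Prop := out = validate_strategy_parameters_alt strategy_name parameters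
instance (strategy_name : String) (parameters : List (String × Int)) (out : Bool × String) : Decidable (Spec_validate_strategy_parameters strategy_name parameters out) := by unfold Spec_validate_strategy_parameters; infer_instance

-- ===== CLAIM (what is proved, stated in full; the proofs are below) =====
def Claim_equal_validate_strategy_parameters : Prop := ∀ (strategy_name : String) (parameters : List (String × Int)), Dom_validate_strategy_parameters strategy_name parameters → Spec_validate_strategy_parameters strategy_name parameters (validate_strategy_parameters strategy_name parameters)

-- ===== LEMMAS AND PROOFS =====

-- ===== VERDICT (by name: the statement is the Claim_ definition above) =====
theorem validate_strategy_parameters_spec : Claim_equal_validate_strategy_parameters := by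
  intro sn params _
  unfold Spec_validate_strategy_parameters validate_strategy_parameters validate_strategy_parameters_alt
  by_cases h0 : sn = ""
  · simp [h0]
  · by_cases h1 : sn = "momentum"
    · subst h1
      by_cases c1 : "lookback_period" ∈ params.map Prod.fst <;>
        by_cases c2 : "threshold" ∈ params.map Prod.fst <;>
          simp [pvRequirements, pvCheckA, List.contains_eq_mem, c1, c2]
    · by_cases h2 : sn = "mean_reversion"
      · subst h2
        by_cases c1 : "window_size" ∈ params.map Prod.fst <;>
          by_cases c2 : "std_dev" ∈ params.map Prod.fst <;>
            simp [pvRequirements, pvCheckA, List.contains_eq_mem, c1, c2]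
      · have e1 : ("momentum" == sn) = false := by simp [Ne.symm h1]
        have e2 : ("mean_reversion" == sn) = false := by simp [Ne.symm h2]
        simp [h0, h1, h2, pvRequirements, e1, e2]
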